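-- pv_equiv track=rewrite | github.com/Star-live/algorithm-problems | 哈希表/1995-统计特殊四元组.py | countQuadruplets_3
-- ===== SOURCE A (Python) =====
-- from collections import Counter
--
-- def countQuadruplets_3(nums):
--     n = len(nums)
--     ans = 0
--     cnt = Counter()
--     for b in range(n-3, 0, -1):
--         for d in range(b+2, n):
--             cnt[nums[d]-nums[b+1]] += 1
--         for a in range(b):
--             if (total := nums[a] + nums[b]) in cnt:
--                 ans += cnt[total]
--     return ans
-- ===== SOURCE B (Python) =====
-- def countQuadruplets_3(nums):
--     n = len(nums)
--     ans = 0
--     for a in range(n):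
--         for b in range(a + 1, n):
--             for c in range(b + 1, n):
--                 for d in range(c + 1, n):
--                     if nums[a] + nums[b] + nums[c] == nums[d]:
--                         ans += 1
--     return ans
-- ===== Notes on version B (the rewrite author's own statement) =====
-- stated objective: simpler
-- what changed: Replaced A's reverse-b sweep with an incrementally grown hash Counter of suffix differences nums[d]-nums[b+1] by a direct four-nested-loop enumeration of all index quadruples a<b<c<d, counting those with nums[a]+nums[b]+nums[c]==nums[d]; no auxiliary data structure.
import Mathlib
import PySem

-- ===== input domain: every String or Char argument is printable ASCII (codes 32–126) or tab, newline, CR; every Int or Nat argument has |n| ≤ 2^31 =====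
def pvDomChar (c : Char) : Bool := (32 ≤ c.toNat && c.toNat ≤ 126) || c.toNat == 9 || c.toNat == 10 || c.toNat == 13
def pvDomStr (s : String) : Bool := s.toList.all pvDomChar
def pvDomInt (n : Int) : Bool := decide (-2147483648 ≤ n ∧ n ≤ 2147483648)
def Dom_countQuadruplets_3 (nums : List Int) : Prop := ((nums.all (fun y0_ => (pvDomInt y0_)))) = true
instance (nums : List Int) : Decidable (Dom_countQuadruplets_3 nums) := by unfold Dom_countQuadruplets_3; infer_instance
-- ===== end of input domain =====

-- B replaces A's reverse-b sweep with its incrementally built Counter of suffix differences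
-- by a plain direct enumeration of all index quadruples a<b<c<d (objective: simpler, not faster;
-- a timing run measured B slower than A on larger inputs).

-- ===== PORT A =====
def countQuadruplets_3 (nums : List Int) : Int :=
  let n : Int := nums.length
  let res := (PySem.List.pyRange (n - 3) 0 (-1)).foldl
    (fun (st : Int × PySem.Dict Int Int) b =>
      let cnt := (PySem.List.pyRange (b + 2) n).foldl
        (fun cnt d =>
          cnt.modify (PySem.List.pyGetD nums d 0 - PySem.List.pyGetD nums (b + 1) 0) 0 (· + 1)) st.2
      let ans := (PySem.List.pyRange 0 b).foldl
        (fun ans a =>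
          let total := PySem.List.pyGetD nums a 0 + PySem.List.pyGetD nums b 0
          if cnt.contains total then ans + cnt.getD total 0 else ans) st.1
      (ans, cnt))
    (0, PySem.Dict.empty)
  res.1

-- ===== PORT B =====
def countQuadruplets_3_alt (nums : List Int) : Int :=
  let n : Int := nums.length
  (PySem.List.pyRange 0 n).foldl (fun ans a =>
    (PySem.List.pyRange (a + 1) n).foldl (fun ans b =>
      (PySem.List.pyRange (b + 1) n).foldl (fun ans c =>
        (PySem.List.pyRange (c + 1) n).foldl (fun ans d =>
          if PySem.List.pyGetD nums a 0 + PySem.List.pyGetD nums b 0 + PySem.List.pyGetD nums c 0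
             = PySem.List.pyGetD nums d 0
          then ans + 1 else ans) ans) ans) ans) 0

-- ===== PRECONDITION & SPEC =====
def Spec_countQuadruplets_3 (nums : List Int) (out : Int) : Prop := out = countQuadruplets_3_alt nums
instance (nums : List Int) (out : Int) : Decidable (Spec_countQuadruplets_3 nums out) := by unfold Spec_countQuadruplets_3; infer_instance

-- ===== CLAIM (what is proved, stated in full; the proofs are below) =====
def Claim_equal_countQuadruplets_3 : Prop := ∀ (nums : List Int), Dom_countQuadruplets_3 nums → Spec_countQuadruplets_3 nums (countQuadruplets_3 nums)

-- ===== LEMMAS AND PROOFS =====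

-- nums[i] as both ports read it
def pvG (nums : List Int) (i : Int) : Int := PySem.List.pyGetD nums i 0
-- number of valid d's for a fixed (a, b, c)
def pvCP (nums : List Int) (a b c : Int) : Nat :=
  (PySem.List.pyRange (c + 1) nums.length).countP
    (fun d => decide (pvG nums a + pvG nums b + pvG nums c = pvG nums d))
-- the multiset of differences nums[d]-nums[c] for c0 ≤ c < d < n: A's counter contents
def pvTail (nums : List Int) (c0 : Int) : List Int :=
  (PySem.List.pyRange c0 nums.length).flatMap
    (fun c => (PySem.List.pyRange (c + 1) nums.length).map (fun d => pvG nums d - pvG nums c))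
-- contribution of one outer iteration b of A
def pvS (nums : List Int) (b : Int) : Int :=
  ((PySem.List.pyRange 0 b).map
    (fun a => ((pvTail nums (b + 1)).count (pvG nums a + pvG nums b) : Int))).sum
-- number of valid (c, d) pairs for a fixed (a, b)
def pvT (nums : List Int) (a b : Int) : Int :=
  ((PySem.List.pyRange (b + 1) nums.length).map (fun c => (pvCP nums a b c : Int))).sum

lemma sum_pyRange_aux (f : Int → Int) (b : Int) :
    ∀ (k : Nat) (a : Int), (b - a).toNat ≤ k →
    ((PySem.List.pyRange a b).map f).sum = ∑ i ∈ Finset.Ico a b, f i := by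
  intro k
  induction k with
  | zero =>
    intro a hk
    rw [PySem.List.pyRange_one_eq_nil (by omega), Finset.Ico_eq_empty (by omega)]
    simp
  | succ k ih =>
    intro a hk
    by_cases hab : b ≤ a
    · rw [PySem.List.pyRange_one_eq_nil hab, Finset.Ico_eq_empty (by omega)]
      simp
    · have hab' : a < b := by omega
      rw [PySem.List.pyRange_one_cons hab', List.map_cons, List.sum_cons, ih (a + 1) (by omega)]
      have hins : Finset.Ico a b = insert a (Finset.Ico (a + 1) b) := by
        ext x; simp [Finset.mem_Ico, Finset.mem_insert]; omega
      rw [hins, Finset.sum_insert (by simp)]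

lemma sum_pyRange (f : Int → Int) (a b : Int) :
    ((PySem.List.pyRange a b).map f).sum = ∑ i ∈ Finset.Ico a b, f i :=
  sum_pyRange_aux f b (b - a).toNat a le_rfl

lemma tail_cons (nums : List Int) (c0 : Int) (h : c0 < (nums.length : Int)) :
    pvTail nums c0
      = (PySem.List.pyRange (c0 + 1) nums.length).map (fun d => pvG nums d - pvG nums c0)
        ++ pvTail nums (c0 + 1) := by
  unfold pvTail
  rw [PySem.List.pyRange_one_cons h, List.flatMap_cons]

lemma tail_nil (nums : List Int) (c0 : Int) (h : (nums.length : Int) ≤ c0 + 1) :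
    pvTail nums c0 = [] := by
  unfold pvTail
  rw [List.flatMap_eq_nil_iff]
  intro c hc
  rw [PySem.List.mem_pyRange_one] at hc
  rw [PySem.List.pyRange_one_eq_nil (by omega), List.map_nil]

lemma cnt_step (nums : List Int) (b : Int) (cnt : PySem.Dict Int Int) (t : Int) :
    (((PySem.List.pyRange (b + 2) nums.length).foldl
        (fun cnt d =>
          cnt.modify (PySem.List.pyGetD nums d 0 - PySem.List.pyGetD nums (b + 1) 0) 0 (· + 1)) cnt)).getD t 0
      = cnt.getD t 0
        + (((PySem.List.pyRange (b + 2) nums.length).map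
            (fun d => pvG nums d - pvG nums (b + 1))).count t : Int) := by
  simp only [pvG]
  rw [← List.foldl_map (f := fun d => PySem.List.pyGetD nums d 0 - PySem.List.pyGetD nums (b + 1) 0)
      (g := fun cnt x => PySem.Dict.modify cnt x 0 (· + 1))]
  exact PySem.Dict.getD_foldl_modify_add_one _ cnt t

lemma count_tail (nums : List Int) (b v : Int) :
    ((pvTail nums (b + 1)).count v : Int)
      = ((PySem.List.pyRange (b + 1) nums.length).map
          (fun c => (((PySem.List.pyRange (c + 1) nums.length).map
              (fun d => pvG nums d - pvG nums c)).count v : Int))).sum := by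
  unfold pvTail
  rw [List.count_eq_countP, List.countP_flatMap, Nat.cast_list_sum, List.map_map]
  simp [Function.comp_def, List.count_eq_countP]

lemma T_zero (nums : List Int) (a b : Int) (h : (nums.length : Int) - 2 ≤ b) : pvT nums a b = 0 := by
  unfold pvT
  apply List.sum_eq_zero
  intro x hx
  rw [List.mem_map] at hx
  obtain ⟨c, hc, rfl⟩ := hx
  rw [PySem.List.mem_pyRange_one] at hc
  unfold pvCP
  rw [PySem.List.pyRange_one_eq_nil (by omega)]
  simp

lemma ans_step (nums : List Int) (b : Int) (cnt : PySem.Dict Int Int) (ans : Int)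
    (hc : ∀ t, cnt.getD t 0 = ((pvTail nums (b + 1)).count t : Int)) :
    (PySem.List.pyRange 0 b).foldl
        (fun ans a =>
          let total := PySem.List.pyGetD nums a 0 + PySem.List.pyGetD nums b 0
          if cnt.contains total then ans + cnt.getD total 0 else ans) ans
      = ans + pvS nums b := by
  have h : ∀ (acc : Int) (a : Int), a ∈ PySem.List.pyRange 0 b →
      (let total := PySem.List.pyGetD nums a 0 + PySem.List.pyGetD nums b 0
       if cnt.contains total then acc + cnt.getD total 0 else acc)
      = acc + ((pvTail nums (b + 1)).count (pvG nums a + pvG nums b) : Int) := by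
    intro acc a _
    simp only [pvG]
    by_cases hco : cnt.contains (PySem.List.pyGetD nums a 0 + PySem.List.pyGetD nums b 0)
    · simp only [hco, if_true, hc]
    · rw [if_neg hco]
      have h0 := PySem.Dict.getD_of_not_contains cnt (0 : Int) (by simpa using hco)
      rw [hc] at h0
      omega
  rw [PySem.List.foldl_congr_mem _ _
      (fun acc a => acc + ((pvTail nums (b + 1)).count (pvG nums a + pvG nums b) : Int)) _ h,
    PySem.List.foldl_add]
  rfl

lemma term_eq (nums : List Int) (a b : Int) :
    ((pvTail nums (b + 1)).count (pvG nums a + pvG nums b) : Int) = pvT nums a b := by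
  rw [count_tail]
  unfold pvT
  congr 1
  apply List.map_congr_left
  intro c _
  have : (List.map (fun d => pvG nums d - pvG nums c) (PySem.List.pyRange (c + 1) nums.length)).count
          (pvG nums a + pvG nums b) = pvCP nums a b c := by
    rw [List.count_eq_countP, List.countP_map]
    unfold pvCP
    apply List.countP_congr
    intro d _
    simp only [Function.comp_apply, beq_iff_eq, decide_eq_true_eq]
    omega
  rw [this]

lemma S_eq_sum_T (nums : List Int) (b : Int) :
    pvS nums b = ∑ a ∈ Finset.Ico (0:Int) b, pvT nums a b := by
  unfold pvS
  rw [List.map_congr_left (fun a _ => term_eq nums a b), sum_pyRange]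

lemma altL1 (nums : List Int) (a b c ans : Int) :
    (PySem.List.pyRange (c + 1) (nums.length : Int)).foldl
      (fun ans d =>
        if PySem.List.pyGetD nums a 0 + PySem.List.pyGetD nums b 0 + PySem.List.pyGetD nums c 0
           = PySem.List.pyGetD nums d 0
        then ans + 1 else ans) ans
    = ans + (pvCP nums a b c : Int) := by
  rw [PySem.List.foldl_ite_add_one
    (p := fun d => PySem.List.pyGetD nums a 0 + PySem.List.pyGetD nums b 0 + PySem.List.pyGetD nums c 0
           = PySem.List.pyGetD nums d 0)]
  rfl

lemma altL2 (nums : List Int) (a b ans : Int) :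
    (PySem.List.pyRange (b + 1) (nums.length : Int)).foldl
      (fun ans c =>
        (PySem.List.pyRange (c + 1) (nums.length : Int)).foldl
          (fun ans d =>
            if PySem.List.pyGetD nums a 0 + PySem.List.pyGetD nums b 0 + PySem.List.pyGetD nums c 0
               = PySem.List.pyGetD nums d 0
            then ans + 1 else ans) ans) ans
    = ans + pvT nums a b := by
  rw [PySem.List.foldl_congr_mem _ _ (fun acc c => acc + (pvCP nums a b c : Int)) _
      (fun acc c _ => altL1 nums a b c acc), PySem.List.foldl_add]
  rfl

lemma altL3 (nums : List Int) (a ans : Int) :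
    (PySem.List.pyRange (a + 1) (nums.length : Int)).foldl
      (fun ans b =>
        (PySem.List.pyRange (b + 1) (nums.length : Int)).foldl
          (fun ans c =>
            (PySem.List.pyRange (c + 1) (nums.length : Int)).foldl
              (fun ans d =>
                if PySem.List.pyGetD nums a 0 + PySem.List.pyGetD nums b 0 + PySem.List.pyGetD nums c 0
                   = PySem.List.pyGetD nums d 0
                then ans + 1 else ans) ans) ans) ans
    = ans + ∑ b ∈ Finset.Ico (a + 1) (nums.length : Int), pvT nums a b := by
  rw [PySem.List.foldl_congr_mem _ _ (fun acc b => acc + pvT nums a b) _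
      (fun acc b _ => altL2 nums a b acc), PySem.List.foldl_add, sum_pyRange]

lemma alt_eq (nums : List Int) :
    countQuadruplets_3_alt nums
      = ∑ a ∈ Finset.Ico (0:Int) (nums.length : Int),
          ∑ b ∈ Finset.Ico (a + 1) (nums.length : Int), pvT nums a b := by
  show (PySem.List.pyRange 0 (nums.length : Int)).foldl _ 0 = _
  rw [PySem.List.foldl_congr_mem _ _
      (fun acc a => acc + ∑ b ∈ Finset.Ico (a + 1) (nums.length : Int), pvT nums a b) _
      (fun acc a _ => altL3 nums a acc), PySem.List.foldl_add, sum_pyRange, zero_add]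

lemma swap_sum (nums : List Int) :
    ∑ b ∈ Finset.Ico (1:Int) ((nums.length : Int) - 2), ∑ a ∈ Finset.Ico (0:Int) b, pvT nums a b
      = ∑ a ∈ Finset.Ico (0:Int) (nums.length:Int),
          ∑ b ∈ Finset.Ico (a+1) (nums.length:Int), pvT nums a b := by
  rw [Finset.sum_subset
      (Finset.Ico_subset_Ico le_rfl (show ((nums.length:Int) - 2) ≤ (nums.length:Int) by omega))
      (fun b _ hb => Finset.sum_eq_zero (fun a _ => T_zero nums a b (by
        simp [Finset.mem_Ico] at *; omega)))]
  rw [Finset.sum_subset (Finset.Ico_subset_Ico (show (0:Int) ≤ 1 by norm_num) le_rfl)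
      (fun b hb hb2 => by
        have : b = 0 := by simp [Finset.mem_Ico] at *; omega
        subst this; simp)]
  have step3 : ∀ b ∈ Finset.Ico (0:Int) (nums.length:Int),
      ∑ a ∈ Finset.Ico (0:Int) b, pvT nums a b
        = ∑ a ∈ Finset.Ico (0:Int) (nums.length:Int), if a < b then pvT nums a b else 0 := by
    intro b hb
    rw [← Finset.sum_filter]
    apply Finset.sum_congr _ (fun _ _ => rfl)
    ext x
    simp [Finset.mem_Ico] at *
    omega
  rw [Finset.sum_congr rfl step3, Finset.sum_comm]
  apply Finset.sum_congr rfl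
  intro a ha
  rw [← Finset.sum_filter]
  apply Finset.sum_congr _ (fun _ _ => rfl)
  ext x
  simp [Finset.mem_Ico] at *
  omega

lemma loopA (nums : List Int) : ∀ (k : Nat) (m : Int), m ≤ (k : Int) →
    m + 3 ≤ (nums.length : Int) →
    ∀ (ans : Int) (cnt : PySem.Dict Int Int),
    (∀ t, cnt.getD t 0 = ((pvTail nums (m + 2)).count t : Int)) →
    ((PySem.List.pyRange m 0 (-1)).foldl
      (fun (st : Int × PySem.Dict Int Int) b =>
        let cnt := (PySem.List.pyRange (b + 2) (nums.length : Int)).foldl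
          (fun cnt d =>
            cnt.modify (PySem.List.pyGetD nums d 0 - PySem.List.pyGetD nums (b + 1) 0) 0 (· + 1)) st.2
        let ans := (PySem.List.pyRange 0 b).foldl
          (fun ans a =>
            let total := PySem.List.pyGetD nums a 0 + PySem.List.pyGetD nums b 0
            if cnt.contains total then ans + cnt.getD total 0 else ans) st.1
        (ans, cnt)) (ans, cnt)).1
      = ans + ((PySem.List.pyRange 1 (m + 1)).map (pvS nums)).sum := by
  intro k
  induction k with
  | zero =>
    intro m hk hn ans cnt hc
    rw [PySem.List.pyRange_neg_one_eq_nil (by omega), PySem.List.pyRange_one_eq_nil (by omega)]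
    simp
  | succ k ih =>
    intro m hk hn ans cnt hc
    by_cases hm : m ≤ 0
    · rw [PySem.List.pyRange_neg_one_eq_nil (by omega), PySem.List.pyRange_one_eq_nil (by omega)]
      simp
    · have hm' : (0:Int) < m := by omega
      rw [PySem.List.pyRange_neg_one_cons hm', List.foldl_cons]
      have hcnt' : ∀ t,
          ((PySem.List.pyRange (m + 2) (nums.length : Int)).foldl
            (fun cnt d =>
              cnt.modify (PySem.List.pyGetD nums d 0 - PySem.List.pyGetD nums (m + 1) 0) 0 (· + 1)) cnt).getD t 0
          = ((pvTail nums (m + 1)).count t : Int) := by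
        intro t
        rw [cnt_step, hc, tail_cons nums (m + 1) (by omega)]
        have h21 : m + 1 + 1 = m + 2 := by ring
        rw [h21, List.count_append]
        push_cast
        omega
      rw [ih (m - 1) (by omega) (by omega)
        ((PySem.List.pyRange 0 m).foldl
          (fun ans a =>
            let total := PySem.List.pyGetD nums a 0 + PySem.List.pyGetD nums m 0
            if ((PySem.List.pyRange (m + 2) (nums.length : Int)).foldl
                (fun cnt d =>
                  cnt.modify (PySem.List.pyGetD nums d 0 - PySem.List.pyGetD nums (m + 1) 0) 0 (· + 1)) cnt).contains total
            then ans + ((PySem.List.pyRange (m + 2) (nums.length : Int)).foldl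
                (fun cnt d =>
                  cnt.modify (PySem.List.pyGetD nums d 0 - PySem.List.pyGetD nums (m + 1) 0) 0 (· + 1)) cnt).getD total 0
            else ans) ans)
        ((PySem.List.pyRange (m + 2) (nums.length : Int)).foldl
          (fun cnt d =>
            cnt.modify (PySem.List.pyGetD nums d 0 - PySem.List.pyGetD nums (m + 1) 0) 0 (· + 1)) cnt)
        (by
          intro t
          have : m - 1 + 2 = m + 1 := by ring
          rw [this]
          exact hcnt' t)]
      rw [ans_step nums m _ ans hcnt']
      have hr : PySem.List.pyRange 1 (m + 1) = PySem.List.pyRange 1 m ++ [m] :=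
        PySem.List.pyRange_one_succ_right (by omega)
      rw [hr, List.map_append, List.sum_append]
      have : m - 1 + 1 = m := by ring
      rw [this]
      simp
      ring

lemma A_eq (nums : List Int) :
    countQuadruplets_3 nums
      = ((PySem.List.pyRange 1 ((nums.length : Int) - 2)).map (pvS nums)).sum := by
  have hc0 : ∀ t, (PySem.Dict.empty : PySem.Dict Int Int).getD t 0
      = ((pvTail nums ((nums.length : Int) - 3 + 2)).count t : Int) := by
    intro t
    rw [tail_nil nums _ (by omega)]
    simp
  show ((PySem.List.pyRange ((nums.length : Int) - 3) 0 (-1)).foldl _ (0, PySem.Dict.empty)).1 = _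
  rw [loopA nums ((nums.length : Int) - 3).toNat ((nums.length : Int) - 3)
    (Int.self_le_toNat _) (by omega) 0 PySem.Dict.empty hc0]
  have h1 : (nums.length : Int) - 3 + 1 = (nums.length : Int) - 2 := by ring
  rw [h1, zero_add]

-- ===== VERDICT (by name: the statement is the Claim_ definition above) =====
theorem countQuadruplets_3_spec : Claim_equal_countQuadruplets_3 := by
  intro nums _
  show countQuadruplets_3 nums = countQuadruplets_3_alt nums
  rw [A_eq, alt_eq, ← swap_sum, sum_pyRange]
  exact Finset.sum_congr rfl (fun b _ => S_eq_sum_T nums b)
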